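-- pv_equiv track=rewrite | github.com/GiladZur/stock-analyzer-pro | utils/score_helpers.py | news_impact
-- ===== SOURCE A (Python) =====
-- def news_impact(title: str) -> int:
--     """Score news impact 1-10."""
--     t = title.lower()
--     if any(w in t for w in [
--         "fed", "interest rate", "rate hike", "rate cut",
--         "earnings beat", "earnings miss", "bankruptcy",
--         "merger", "acquisition", "fomc",
--     ]):
--         return 9
--     if any(w in t for w in [
--         "revenue", "guidance", "forecast", "profit",
--         "loss", "upgrade", "downgrade", "ceo", "layoff",
--         "restructuring",
--     ]):
--         return 6
--     if any(w in t for w in [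
--         "product", "launch", "partnership", "contract",
--         "deal", "expansion",
--     ]):
--         return 4
--     return 2
-- ===== SOURCE B (Python) =====
-- _TIER9 = ["fed", "interest rate", "rate hike", "rate cut",
--           "earnings beat", "earnings miss", "bankruptcy",
--           "merger", "acquisition", "fomc"]
-- _TIER6 = ["revenue", "guidance", "forecast", "profit",
--           "loss", "upgrade", "downgrade", "ceo", "layoff",
--           "restructuring"]
-- _TIER4 = ["product", "launch", "partnership", "contract",
--           "deal", "expansion"]
-- _KEYWORD_SCORES = [(w, 9) for w in _TIER9] + \
--                   [(w, 6) for w in _TIER6] + \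
--                   [(w, 4) for w in _TIER4]
--
-- def news_impact(title: str) -> int:
--     """Score news impact 1-10."""
--     t = title.lower()
--     best = 2
--     # Position-driven multi-pattern scan: walk every start position of the
--     # lowered title once and prefix-match the keywords there, keeping the
--     # maximal score seen.  No per-keyword substring search ("w in t") at all.
--     for i in range(len(t)):
--         for w, s in _KEYWORD_SCORES:
--             if t.startswith(w, i):
--                 best = max(best, s)
--     return best
-- ===== Notes on version B (the rewrite author's own statement) =====
-- stated objective: alternative
-- what changed: Replaced A's three tiered any(w in t) membership branches by a position-driven multi-pattern scan: walk each start index of the lowered title once, prefix-match every keyword there, and accumulate the maximal score (default 2); correct because a keyword is a substring iff it is a prefix at some position and higher tiers carry strictly higher scores.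
import Mathlib
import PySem

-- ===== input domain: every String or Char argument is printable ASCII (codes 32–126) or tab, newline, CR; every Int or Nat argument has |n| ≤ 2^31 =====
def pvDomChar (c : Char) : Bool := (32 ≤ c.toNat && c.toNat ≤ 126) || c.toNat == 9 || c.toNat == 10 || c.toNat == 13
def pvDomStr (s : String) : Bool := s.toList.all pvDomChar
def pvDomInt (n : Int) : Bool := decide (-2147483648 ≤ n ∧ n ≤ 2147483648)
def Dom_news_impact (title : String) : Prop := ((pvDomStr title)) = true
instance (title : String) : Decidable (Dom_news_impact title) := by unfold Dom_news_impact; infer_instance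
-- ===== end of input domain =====

-- B replaces A's tiered per-keyword substring tests by a position-driven scan of the
-- lowered title that prefix-matches the keywords at each index, accumulating the max score.

-- ===== PORT A =====
def pvTier9 : List String := ["fed", "interest rate", "rate hike", "rate cut",
  "earnings beat", "earnings miss", "bankruptcy", "merger", "acquisition", "fomc"]
def pvTier6 : List String := ["revenue", "guidance", "forecast", "profit",
  "loss", "upgrade", "downgrade", "ceo", "layoff", "restructuring"]
def pvTier4 : List String := ["product", "launch", "partnership", "contract",
  "deal", "expansion"]

def news_impact (title : String) : Int :=
  let t := PySem.Str.lower title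
  if pvTier9.any (fun w => PySem.Str.isIn w t) then 9
  else if pvTier6.any (fun w => PySem.Str.isIn w t) then 6
  else if pvTier4.any (fun w => PySem.Str.isIn w t) then 4
  else 2

-- ===== PORT B =====
def pvKeywordScores : List (String × Int) :=
  pvTier9.map (fun w => (w, 9)) ++ pvTier6.map (fun w => (w, 6)) ++ pvTier4.map (fun w => (w, 4))

-- Python's t.startswith(w, i) is ported as Chars.startswith on (t.toList.drop i.toNat):
-- exact here since i comes from range(len(t)), so 0 ≤ i ≤ len(t).
def news_impact_alt (title : String) : Int :=
  let t := PySem.Str.lower title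
  (PySem.List.pyRange 0 (PySem.Str.len t) 1).foldl
    (fun best i =>
      pvKeywordScores.foldl
        (fun b p => if PySem.Chars.startswith (t.toList.drop i.toNat) p.1.toList then max b p.2 else b)
        best)
    2

-- ===== PRECONDITION & SPEC =====
def Spec_news_impact (title : String) (out : Int) : Prop := out = news_impact_alt title
instance (title : String) (out : Int) : Decidable (Spec_news_impact title out) := by unfold Spec_news_impact; infer_instance

-- ===== CLAIM (what is proved, stated in full; the proofs are below) =====
def Claim_equal_news_impact : Prop := ∀ (title : String), Dom_news_impact title → Spec_news_impact title (news_impact title)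

-- ===== LEMMAS AND PROOFS =====

-- the conditional-max fold over the keyword table, under an arbitrary condition
def pvFold (c : String × Int → Bool) (ps : List (String × Int)) (acc : Int) : Int :=
  ps.foldl (fun b p => if c p then max b p.2 else b) acc

theorem pvFold_exchange (c : String × Int → Bool) (ps : List (String × Int)) (a b : Int) :
    pvFold c ps (max a b) = max a (pvFold c ps b) := by
  induction ps generalizing b with
  | nil => simp [pvFold]
  | cons p ps ih =>
    cases h : c p with
    | false => simp only [pvFold, List.foldl_cons, h, Bool.false_eq_true, if_false] at *; exact ih b
    | true =>
      simp only [pvFold, List.foldl_cons, h, if_true] at *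
      rw [max_assoc]; exact ih (max b p.2)

theorem pvFold_cons (c : String × Int → Bool) (p : String × Int) (ps : List (String × Int)) (acc : Int) :
    pvFold c (p :: ps) acc = pvFold c ps (if c p then max acc p.2 else acc) := rfl

theorem pvFold_split (c₁ c₂ : String × Int → Bool) (ps : List (String × Int)) (acc : Int) :
    pvFold (fun p => c₁ p || c₂ p) ps acc = pvFold c₂ ps (pvFold c₁ ps acc) := by
  induction ps generalizing acc with
  | nil => rfl
  | cons p ps ih =>
    rw [pvFold_cons, pvFold_cons, pvFold_cons, ih]
    congr 1
    cases h1 : c₁ p <;> cases h2 : c₂ p <;>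
      simp only [Bool.or_false, Bool.or_true, Bool.false_eq_true, if_false, if_true]
    · have := pvFold_exchange c₁ ps p.2 acc
      rw [max_comm p.2 acc] at this
      rw [this, max_comm p.2 (pvFold c₁ ps acc)]
    · have := pvFold_exchange c₁ ps p.2 acc
      rw [max_comm p.2 acc] at this
      rw [this, max_eq_left (le_max_left p.2 (pvFold c₁ ps acc))]

-- the nested position loop collapses to one conditional-max fold with an 'any position' condition
theorem pvFold_positions (t : List Char) (ps : List (String × Int)) (l : List Nat) (acc : Int) :
    l.foldl (fun best i => pvFold (fun p => PySem.Chars.startswith (t.drop i) p.1.toList) ps best) acc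
      = pvFold (fun p => l.any (fun i => PySem.Chars.startswith (t.drop i) p.1.toList)) ps acc := by
  induction l generalizing acc with
  | nil =>
    simp only [List.foldl_nil, List.any_nil]
    induction ps with
    | nil => simp [pvFold]
    | cons p ps ih => simp only [pvFold, List.foldl_cons, Bool.false_eq_true, if_false] at *; exact ih
  | cons i l ih =>
    simp only [List.foldl_cons, ih]
    rw [show (fun p : String × Int => (i :: l).any fun j => PySem.Chars.startswith (t.drop j) p.1.toList)
          = (fun p : String × Int => (PySem.Chars.startswith (t.drop i) p.1.toList
              || l.any fun j => PySem.Chars.startswith (t.drop j) p.1.toList)) from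
        funext fun p => by simp [List.any_cons]]
    rw [pvFold_split]

-- a nonempty keyword is a prefix at some position below the length iff it is a substring
theorem pv_any_range (t w : List Char) (hw : w ≠ []) :
    ((List.range t.length).any fun k => PySem.Chars.startswith (t.drop k) w)
      = PySem.Chars.isIn w t := by
  rw [Bool.eq_iff_iff, ← PySem.Chars.exists_prefix_drop_iff_isIn]
  simp only [List.any_eq_true, List.mem_range, PySem.Chars.startswith_iff]
  constructor
  · rintro ⟨k, _, h⟩; exact ⟨k, h⟩
  · rintro ⟨j, h⟩
    by_cases hj : j < t.length
    · exact ⟨j, hj, h⟩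
    · exfalso
      rw [List.drop_eq_nil_of_le (le_of_not_gt hj)] at h
      exact hw (List.prefix_nil.mp h)

-- one tier of the isIn-conditioned fold collapses to "if any keyword of the tier matches, max in its score"
theorem pv_foldl_tier (ws : List String) (s : Int) (t : String) (acc : Int) :
    pvFold (fun p => PySem.Str.isIn p.1 t) (ws.map (fun w => (w, s))) acc
      = if ws.any (fun w => PySem.Str.isIn w t) then max acc s else acc := by
  induction ws generalizing acc with
  | nil => simp [pvFold]
  | cons w ws ih =>
    cases h : PySem.Str.isIn w t with
    | false =>
      simp only [pvFold, List.map_cons, List.foldl_cons, List.any_cons, h, Bool.false_or,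
        Bool.false_eq_true, if_false] at *
      exact ih acc
    | true =>
      simp only [pvFold, List.map_cons, List.foldl_cons, List.any_cons, h, Bool.true_or, if_true] at *
      rw [ih (max acc s)]
      cases ws.any (fun w => PySem.Str.isIn w t) <;> simp

theorem pvFold_append (c : String × Int → Bool) (l1 l2 : List (String × Int)) (acc : Int) :
    pvFold c (l1 ++ l2) acc = pvFold c l2 (pvFold c l1 acc) := by
  simp [pvFold]

-- ===== VERDICT (by name: the statement is the Claim_ definition above) =====
theorem news_impact_spec : Claim_equal_news_impact := by
  intro title _
  show news_impact title = news_impact_alt title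
  simp only [news_impact, news_impact_alt]
  generalize PySem.Str.lower title = t
  -- turn B's Int position range into a Nat range
  rw [show (PySem.Str.len t : Int) = (t.toList.length : Int) by simp [PySem.Str.len],
    PySem.List.pyRange_one, show ((t.toList.length : Int) - 0).toNat = t.toList.length by omega,
    List.foldl_map]
  simp only [show ∀ k : Nat, ((0 : Int) + (k : Int)).toNat = k from fun k => by omega]
  rw [show ∀ acc : Int,
        (List.range t.toList.length).foldl
          (fun best k => pvKeywordScores.foldl
            (fun b p => if PySem.Chars.startswith (t.toList.drop k) p.1.toList then max b p.2 else b)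
            best) acc
        = (List.range t.toList.length).foldl
          (fun best k => pvFold (fun p => PySem.Chars.startswith (t.toList.drop k) p.1.toList)
            pvKeywordScores best) acc from fun _ => rfl,
    pvFold_positions]
  have hcong : pvFold (fun p : String × Int =>
        (List.range t.toList.length).any fun k => PySem.Chars.startswith (t.toList.drop k) p.1.toList)
        pvKeywordScores 2
      = pvFold (fun p : String × Int => PySem.Str.isIn p.1 t) pvKeywordScores 2 := by
    unfold pvFold
    apply PySem.List.foldl_congr_mem
    intro acc p hp
    have hne : p.1.toList ≠ [] := by
      have hall : ∀ q ∈ pvKeywordScores, q.1.toList ≠ [] := by decide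
      exact hall p hp
    beta_reduce
    rw [pv_any_range t.toList p.1.toList hne, PySem.Str.isIn_eq]
  rw [hcong]
  rw [show pvKeywordScores = pvTier9.map (fun w => (w, (9:Int))) ++ (pvTier6.map (fun w => (w, (6:Int))) ++ pvTier4.map (fun w => (w, (4:Int)))) from by simp [pvKeywordScores]]
  rw [pvFold_append, pvFold_append, pv_foldl_tier, pv_foldl_tier, pv_foldl_tier]
  cases pvTier9.any (fun w => PySem.Str.isIn w t) <;>
    cases pvTier6.any (fun w => PySem.Str.isIn w t) <;>
      cases pvTier4.any (fun w => PySem.Str.isIn w t) <;> simp
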